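-- pv_equiv track=rewrite | github.com/sgagnonboncode/aoc2023 | src/solvers/day09.py | predict_values
-- ===== SOURCE A (Python) =====
-- def derive_difference_sequence(sequence: list[int]) -> list[int]:
--     diff_seq = []
--
--     for i in range(0, len(sequence) - 1):
--         diff_seq.append(sequence[i + 1] - sequence[i])
--
--     return diff_seq
--
-- def predict_values(sequence: list[int]) -> list[int]:
--     differences_stack: list[list[int]] = [sequence]
--
--     current = sequence
--     while True:
--         differences = derive_difference_sequence(current)
--         differences_stack.append(differences)
--
--         if all(x == 0 for x in differences):
--             break
--         current = differences
--
--     differences_stack[len(differences_stack) - 1].append(0)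
--
--     for j in range(len(differences_stack) - 2, -1, -1):
--         next_value = differences_stack[j + 1][-1] + differences_stack[j][-1]
--         differences_stack[j].append(next_value)
--         prev_value = -differences_stack[j + 1][0] + differences_stack[j][0]
--         differences_stack[j].insert(0, prev_value)
--
--     return differences_stack[0]
-- ===== SOURCE B (Python) =====
-- def predict_values(sequence: list[int]) -> list[int]:
--     # Newton forward-difference closed form: prev and next extrapolations in one
--     # linear pass, with binomial coefficients C(n, j+1) updated incrementally.
--     n = len(sequence)
--     prev = 0
--     nxt = 0
--     c = n  # C(n, 1)
--     for j in range(n):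
--         s = c if j % 2 == 0 else -c
--         prev += s * sequence[j]
--         nxt += s * sequence[n - 1 - j]
--         c = c * (n - j - 1) // (j + 2)  # C(n, j+2)
--     return [prev] + sequence + [nxt]
-- ===== Notes on version B (the rewrite author's own statement) =====
-- stated objective: faster
-- what changed: Replaces the full difference-triangle construction plus backward extrapolation pass by the Newton forward-difference closed form: prev and next are alternating binomial-weighted sums computed in one linear pass with incrementally updated C(n,j+1).
import Mathlib
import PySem

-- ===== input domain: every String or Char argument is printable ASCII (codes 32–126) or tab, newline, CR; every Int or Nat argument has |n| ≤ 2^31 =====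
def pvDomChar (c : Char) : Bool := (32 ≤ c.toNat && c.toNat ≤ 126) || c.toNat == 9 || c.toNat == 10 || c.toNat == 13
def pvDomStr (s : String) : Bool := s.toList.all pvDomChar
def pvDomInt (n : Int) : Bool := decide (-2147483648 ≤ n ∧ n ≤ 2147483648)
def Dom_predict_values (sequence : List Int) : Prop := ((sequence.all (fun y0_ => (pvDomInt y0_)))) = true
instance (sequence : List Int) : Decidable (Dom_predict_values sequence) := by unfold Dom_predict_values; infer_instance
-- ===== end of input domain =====

-- B replaces A's O(n²) difference-triangle + backward extrapolation pass by the Newton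
-- forward-difference closed form (one linear pass with incremental binomial coefficients);
-- note A also mutates its argument list in place — the equivalence proved here is about the
-- return value only (B does not mutate).

-- ===== PORT A =====
def derive_difference_sequence (sequence : List Int) : List Int :=
  (PySem.List.pyRange 0 ((sequence.length : Int) - 1)).foldl
    (fun diff_seq i =>
      diff_seq ++ [PySem.List.pyGetD sequence (i + 1) 0 - PySem.List.pyGetD sequence i 0]) []

-- length fact cited by pvLoopA's termination proof
theorem derive_difference_sequence_length (s : List Int) :
    (derive_difference_sequence s).length = s.length - 1 := by
  unfold derive_difference_sequence
  rw [PySem.List.foldl_append_singleton_eq_map]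
  cases hn : s.length with
  | zero => rw [show ((0 : Nat) : Int) - 1 = -1 by norm_num,
      PySem.List.pyRange_one_eq_nil (by norm_num)]; rfl
  | succ m =>
    rw [show ((m + 1 : Nat) : Int) - 1 = (m : Int) by push_cast; ring,
      PySem.List.pyRange_zero_natCast]
    simp

def pvLoopA (current : List Int) (stack : List (List Int)) : List (List Int) :=
  let differences := derive_difference_sequence current
  let stack' := stack ++ [differences]
  if differences.all (fun x => x == 0) then stack'
  else pvLoopA differences stack'
termination_by current.length
decreasing_by
  rename_i h
  have hne : differences ≠ [] := by
    intro he; rw [he] at h; simp at h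
  have h2 : 0 < (derive_difference_sequence current).length := List.length_pos_iff.mpr hne
  have hl := derive_difference_sequence_length current
  omega

def pvStepA (st : List (List Int)) (j : Int) : List (List Int) :=
  let upper := PySem.List.pyGetD st (j + 1) []
  let cur := PySem.List.pyGetD st j []
  let next_value := PySem.List.pyGetD upper (-1) 0 + PySem.List.pyGetD cur (-1) 0
  let cur1 := cur ++ [next_value]
  let prev_value := -PySem.List.pyGetD upper 0 0 + PySem.List.pyGetD cur1 0 0
  st.set j.toNat (prev_value :: cur1)

def predict_values (sequence : List Int) : List Int :=
  let differences_stack := pvLoopA sequence [sequence]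
  let m := differences_stack.length
  let stack1 := differences_stack.set (m - 1)
    (PySem.List.pyGetD differences_stack ((m : Int) - 1) [] ++ [0])
  let stack2 := (PySem.List.pyRange ((m : Int) - 2) (-1) (-1)).foldl pvStepA stack1
  PySem.List.pyGetD stack2 0 []

-- ===== PORT B =====
def predict_values_alt (sequence : List Int) : List Int :=
  let n := sequence.length
  let r := (PySem.List.pyRange 0 (n : Int)).foldl
    (fun (st : Int × Int × Int) j =>
      let s := if PySem.Int.mod j 2 == 0 then st.2.2 else -st.2.2
      (st.1 + s * PySem.List.pyGetD sequence j 0,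
       st.2.1 + s * PySem.List.pyGetD sequence ((n : Int) - 1 - j) 0,
       PySem.Int.floordiv (st.2.2 * ((n : Int) - j - 1)) (j + 2)))
    (0, 0, (n : Int))
  [r.1] ++ sequence ++ [r.2.1]

-- ===== PRECONDITION & SPEC =====
-- Pre_ excludes only the empty list, on which A raises IndexError (it reads the last element
-- of the empty bottom level); B returns a pair of zero extrapolations there.
def Pre_predict_values (sequence : List Int) : Prop := sequence ≠ []
instance (sequence : List Int) : Decidable (Pre_predict_values sequence) := by
  unfold Pre_predict_values; infer_instance
def pvWitness_predict_values : List Int := [1]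

def Spec_predict_values (sequence : List Int) (out : List Int) : Prop := out = predict_values_alt sequence
instance (sequence : List Int) (out : List Int) : Decidable (Spec_predict_values sequence out) := by
  unfold Spec_predict_values; infer_instance

-- ===== CLAIM (what is proved, stated in full; the proofs are below) =====
def Claim_equal_predict_values : Prop := ∀ (sequence : List Int), Dom_predict_values sequence → Pre_predict_values sequence → Spec_predict_values sequence (predict_values sequence)

-- ===== LEMMAS AND PROOFS =====

-- difference sequence, mathematically: zipWith of the tail against the list
def dzip (s : List Int) : List Int := List.zipWith (fun a b => a - b) s.tail s

theorem dzip_length (s : List Int) : (dzip s).length = s.length - 1 := by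
  simp [dzip]

theorem dzip_getElem (s : List Int) (i : ℕ) (h : i < (dzip s).length) :
    (dzip s)[i] = s[i + 1]'(by simp [dzip] at h; omega) - s[i]'(by simp [dzip] at h; omega) := by
  simp [dzip, List.getElem_tail]

theorem derive_eq_dzip (s : List Int) : derive_difference_sequence s = dzip s := by
  unfold derive_difference_sequence
  rw [PySem.List.foldl_append_singleton_eq_map]
  cases s with
  | nil =>
    rw [show (([] : List Int).length : Int) - 1 = -1 by norm_num,
      PySem.List.pyRange_one_eq_nil (by norm_num)]
    rfl
  | cons a t =>
    rw [show (((a :: t).length : Int)) - 1 = (t.length : Int) by simp,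
      PySem.List.pyRange_zero_natCast, List.map_map, List.nil_append]
    apply List.ext_getElem
    · simp [dzip]
    · intro i h1 h2
      have hi : i < t.length := by simpa using h1
      simp only [List.getElem_map, List.getElem_range, Function.comp_apply]
      rw [dzip_getElem _ i h2,
        show ((i : Int) + 1) = ((i + 1 : Nat) : Int) by push_cast; ring,
        PySem.List.pyGetD_natCast, PySem.List.pyGetD_natCast,
        List.getD_eq_getElem _ _ (by simpa using Nat.succ_lt_succ hi),
        List.getD_eq_getElem _ _ (by simp; omega)]

-- backward-extrapolation recursion (prev value) and forward (next value)
def pvP (s : List Int) : Int :=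
  match s with
  | [] => 0
  | a :: t => a - pvP (dzip (a :: t))
termination_by s.length
decreasing_by simp [dzip_length]

def pvN (s : List Int) : Int :=
  match s with
  | [] => 0
  | a :: t => (a :: t).getLastD 0 + pvN (dzip (a :: t))
termination_by s.length
decreasing_by simp [dzip_length]

theorem pvP_nonempty (s : List Int) (h : s ≠ []) : pvP s = s.headD 0 - pvP (dzip s) := by
  cases s with
  | nil => exact absurd rfl h
  | cons a t => rw [pvP]; rfl

theorem pvN_nonempty (s : List Int) (h : s ≠ []) : pvN s = s.getLastD 0 + pvN (dzip s) := by
  cases s with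
  | nil => exact absurd rfl h
  | cons a t => rw [pvN]

theorem dzip_allzero (s : List Int) (h : ∀ x ∈ s, x = 0) : ∀ x ∈ dzip s, x = 0 := by
  intro x hx
  obtain ⟨i, hi, he⟩ := List.mem_iff_getElem.mp hx
  rw [dzip_getElem s i hi] at he
  rw [← he, h _ (List.getElem_mem _), h _ (List.getElem_mem _)]; ring

theorem getLastD_zero (s : List Int) (h : ∀ x ∈ s, x = 0) : s.getLastD 0 = 0 := by
  cases s with
  | nil => rfl
  | cons a t =>
    simp only [List.getLastD_eq_getLast?, List.getLast?_eq_some_getLast (l := a :: t) (by simp),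
      Option.getD_some]
    exact h _ (List.getLast_mem _)

theorem pvP_zero_aux (n : ℕ) : ∀ s : List Int, s.length ≤ n → (∀ x ∈ s, x = 0) → pvP s = 0 := by
  induction n with
  | zero =>
    intro s hl h
    have : s = [] := List.eq_nil_of_length_eq_zero (by omega)
    subst this; rw [pvP]
  | succ n ih =>
    intro s hl h
    cases s with
    | nil => rw [pvP]
    | cons a t =>
      rw [pvP, ih (dzip (a :: t))
        (by have := dzip_length (a :: t); simp only [List.length_cons] at this hl; omega)
        (dzip_allzero _ h), h a (by simp)]
      ring

theorem pvP_zero (s : List Int) (h : ∀ x ∈ s, x = 0) : pvP s = 0 :=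
  pvP_zero_aux s.length s le_rfl h

theorem pvN_zero_aux (n : ℕ) : ∀ s : List Int, s.length ≤ n → (∀ x ∈ s, x = 0) → pvN s = 0 := by
  induction n with
  | zero =>
    intro s hl h
    have : s = [] := List.eq_nil_of_length_eq_zero (by omega)
    subst this; rw [pvN]
  | succ n ih =>
    intro s hl h
    cases s with
    | nil => rw [pvN]
    | cons a t =>
      rw [pvN, ih (dzip (a :: t))
        (by have := dzip_length (a :: t); simp only [List.length_cons] at this hl; omega)
        (dzip_allzero _ h), getLastD_zero _ h]
      ring

theorem pvN_zero (s : List Int) (h : ∀ x ∈ s, x = 0) : pvN s = 0 :=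
  pvN_zero_aux s.length s le_rfl h

-- the chain of difference levels, with the final all-zero level given its appended 0
def pvChain (c : List Int) : List (List Int) :=
  let d := dzip c
  if d.all (fun x => x == 0) then [d] else d :: pvChain d
termination_by c.length
decreasing_by
  rename_i h
  have hne : d ≠ [] := by intro he; rw [he] at h; simp at h
  have h2 : 0 < (dzip c).length := List.length_pos_iff.mpr hne
  have hd := dzip_length c
  omega

def pvChainZ (c : List Int) : List (List Int) :=
  let d := dzip c
  if d.all (fun x => x == 0) then [d ++ [0]] else d :: pvChainZ d
termination_by c.length
decreasing_by
  rename_i h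
  have hne : d ≠ [] := by intro he; rw [he] at h; simp at h
  have h2 : 0 < (dzip c).length := List.length_pos_iff.mpr hne
  have hd := dzip_length c
  omega

theorem pvLoopA_eq_aux (n : ℕ) : ∀ (c : List Int) (st : List (List Int)),
    c.length ≤ n → pvLoopA c st = st ++ pvChain c := by
  induction n with
  | zero =>
    intro c st hl
    have hc : c = [] := List.eq_nil_of_length_eq_zero (by omega)
    subst hc
    rw [pvLoopA, pvChain]
    norm_num [derive_eq_dzip, dzip]
  | succ n ih =>
    intro c st hl
    rw [pvLoopA, pvChain]
    simp only [derive_eq_dzip]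
    split_ifs with h
    · rfl
    · rw [ih (dzip c) (st ++ [dzip c]) (by have := dzip_length c; omega), List.append_assoc]
      rfl

theorem pvLoopA_eq (c : List Int) (st : List (List Int)) :
    pvLoopA c st = st ++ pvChain c :=
  pvLoopA_eq_aux c.length c st le_rfl

theorem pvChain_ne_nil (c : List Int) : pvChain c ≠ [] := by
  rw [pvChain]
  split <;> exact List.cons_ne_nil _ _


theorem pvChainZ_ne_nil (c : List Int) : pvChainZ c ≠ [] := by
  rw [pvChainZ]
  split <;> exact List.cons_ne_nil _ _


theorem pvChainZ_mem_ne_nil (c : List Int) : ∀ L ∈ pvChainZ c, L ≠ [] := by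
  fun_induction pvChainZ c with
  | case1 c d hif => simp
  | case2 c d hif ih =>
    intro L hL
    rcases List.mem_cons.mp hL with h | h
    · subst h
      intro he
      rw [he] at hif; simp at hif
    · exact ih L h

theorem getLastD_cons_ne_nil {α : Type} (x : α) (l : List α) (h : l ≠ []) (d : α) :
    (x :: l).getLastD d = l.getLastD d := by
  cases l with
  | nil => exact absurd rfl h
  | cons b u => simp [List.getLastD_eq_getLast?]

theorem pvChainZ_eq (c : List Int) :
    (pvChain c).dropLast ++ [((pvChain c).getLastD []) ++ [0]] = pvChainZ c := by
  fun_induction pvChainZ c with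
  | case1 c d hif =>
    rw [pvChain, if_pos hif]
    rfl
  | case2 c d hif ih =>
    rw [pvChain, if_neg hif]
    have hne := pvChain_ne_nil d
    rw [List.dropLast_cons_of_ne_nil hne, getLastD_cons_ne_nil _ _ hne _, List.cons_append, ih]

-- the back pass, structurally: extend each level using the already-extended level above
def pvExt1 (L U : List Int) : List Int :=
  let nv := U.getLastD 0 + L.getLastD 0
  let L1 := L ++ [nv]
  (-(U.headD 0) + L1.headD 0) :: L1

def pvExtAll : List (List Int) → List (List Int)
  | [] => []
  | [L] => [L]
  | L :: L' :: rest => pvExt1 L ((pvExtAll (L' :: rest)).headD []) :: pvExtAll (L' :: rest)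

theorem pvExtAll_ne_nil (S : List (List Int)) (h : S ≠ []) : pvExtAll S ≠ [] := by
  cases S with
  | nil => exact absurd rfl h
  | cons L rest =>
    cases rest with
    | nil => exact List.cons_ne_nil _ _
    | cons L' rest' => exact List.cons_ne_nil _ _

theorem pvExtAll_cons (L : List Int) (S : List (List Int)) (h : S ≠ []) :
    pvExtAll (L :: S) = pvExt1 L ((pvExtAll S).headD []) :: pvExtAll S := by
  cases S with
  | nil => exact absurd rfl h
  | cons L' rest => rfl

theorem headD_append_ne_nil {α : Type} (l x : List α) (h : l ≠ []) (d : α) :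
    (l ++ x).headD d = l.headD d := by
  cases l with
  | nil => exact absurd rfl h
  | cons a t => rfl

theorem getD_last {α : Type} (l : List α) (h : l ≠ []) (d : α) :
    l.getD (l.length - 1) d = l.getLastD d := by
  rw [List.getD_eq_getElem _ _ (by have := List.length_pos_iff.mpr h; omega),
    List.getLastD_eq_getLast?, List.getLast?_eq_some_getLast h, Option.getD_some,
    List.getLast_eq_getElem]

theorem set_last {α : Type} (l : List α) (h : l ≠ []) (v : α) :
    l.set (l.length - 1) v = l.dropLast ++ [v] := by
  induction l with
  | nil => exact absurd rfl h
  | cons a t ih =>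
    cases ht : t with
    | nil => rfl
    | cons b u =>
      rw [← ht]
      have htne : t ≠ [] := by rw [ht]; exact List.cons_ne_nil _ _
      have h1 : (a :: t).length - 1 = (t.length - 1) + 1 := by
        rw [ht]; simp
      rw [h1, List.set_cons_succ, ih htne, List.dropLast_cons_of_ne_nil htne, List.cons_append]

-- scalar summaries of the extended stack
def pvPP : List (List Int) → Int
  | [] => 0
  | L :: rest => L.headD 0 - pvPP rest

def pvNN : List (List Int) → Int
  | [] => 0
  | L :: rest => L.getLastD 0 + pvNN rest

theorem pvGetD_neg_one (l : List Int) (d : Int) :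
    PySem.List.pyGetD l (-1) d = l.getLastD d := by
  simp only [PySem.List.pyGetD, PySem.List.pyGet?, PySem.List.pyIdx?]
  cases l with
  | nil => rfl
  | cons a t => simp [List.getLast?_eq_getElem?, List.getLastD_eq_getLast?]

theorem getD_zero {α : Type} (l : List α) (d : α) : l.getD 0 d = l.headD d := by
  cases l <;> rfl

theorem pvExtAll_head (S : List (List Int)) (hne : S ≠ []) (hmem : ∀ L ∈ S, L ≠ []) :
    ((pvExtAll S).headD []).headD 0 = pvPP S ∧ ((pvExtAll S).headD []).getLastD 0 = pvNN S := by
  induction S with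
  | nil => exact absurd rfl hne
  | cons L rest ih =>
    have hL : L ≠ [] := hmem L (by simp)
    cases rest with
    | nil =>
      simp only [pvExtAll, pvPP, pvNN, List.headD_cons]
      constructor <;> ring
    | cons L' rest' =>
      have hrest : (L' :: rest') ≠ [] := List.cons_ne_nil _ _
      obtain ⟨ihP, ihN⟩ := ih hrest (fun x hx => hmem x (List.mem_cons_of_mem _ hx))
      rw [pvExtAll_cons L _ hrest]
      simp only [List.headD_cons]
      unfold pvExt1
      constructor
      · rw [show pvPP (L :: L' :: rest') = L.headD 0 - pvPP (L' :: rest') from rfl]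
        simp only [List.headD_cons]
        rw [headD_append_ne_nil _ _ hL, ihP]
        ring
      · rw [show pvNN (L :: L' :: rest') = L.getLastD 0 + pvNN (L' :: rest') from rfl]
        rw [getLastD_cons_ne_nil _ _ (by simp) _, List.getLastD_concat, ihN]
        ring

theorem getD_append_len {α : Type} (P X : List α) (d : α) :
    (P ++ X).getD P.length d = X.headD d := by
  rw [List.getD_append_right _ _ _ _ le_rfl, Nat.sub_self, getD_zero]

theorem getD_append_len_succ {α : Type} (P : List α) (x : α) (X : List α) (d : α) :
    (P ++ (x :: X)).getD (P.length + 1) d = X.headD d := by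
  rw [List.getD_append_right _ _ _ _ (by omega), Nat.add_sub_cancel_left, List.getD_cons_succ,
    getD_zero]

theorem set_append_len {α : Type} (P : List α) (x v : α) (X : List α) :
    (P ++ (x :: X)).set P.length v = P ++ (v :: X) := by
  rw [List.set_append_right _ _ le_rfl, Nat.sub_self, List.set_cons_zero]

-- the descending-index foldl is the structural back pass
theorem pvDownfold (Pfx Sfx : List (List Int)) (hS : Sfx ≠ []) :
    (PySem.List.pyRange ((Pfx.length : Int) - 1) (-1) (-1)).foldl pvStepA (Pfx ++ pvExtAll Sfx)
      = pvExtAll (Pfx ++ Sfx) := by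
  induction Pfx using List.reverseRecOn generalizing Sfx with
  | nil =>
    rw [show ((([] : List (List Int)).length : Int)) - 1 = -1 by simp,
      PySem.List.pyRange_neg_one_eq_nil (by norm_num)]
    simp
  | append_singleton P L ih =>
    have hE : pvExtAll Sfx ≠ [] := pvExtAll_ne_nil Sfx hS
    have hlen : ((P ++ [L]).length : Int) - 1 = (P.length : Int) := by simp
    rw [hlen, PySem.List.pyRange_neg_one_cons (by omega), List.foldl_cons]
    have hstep : pvStepA ((P ++ [L]) ++ pvExtAll Sfx) (P.length : Int)
        = P ++ pvExtAll (L :: Sfx) := by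
      simp only [pvStepA]
      rw [pvExtAll_cons L Sfx hS, List.append_assoc,
        show ([L] ++ pvExtAll Sfx) = L :: pvExtAll Sfx from rfl,
        show ((P.length : Int) + 1) = ((P.length + 1 : ℕ) : Int) by push_cast; ring,
        PySem.List.pyGetD_natCast, PySem.List.pyGetD_natCast,
        getD_append_len_succ, getD_append_len,
        Int.toNat_natCast, set_append_len,
        pvGetD_neg_one, pvGetD_neg_one, PySem.List.pyGetD_ofNat', PySem.List.pyGetD_ofNat',
        getD_zero, getD_zero]
      simp only [List.headD_cons, pvExt1]
    rw [hstep]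
    have := ih (L :: Sfx) (List.cons_ne_nil _ _)
    rw [this, List.append_assoc]
    rfl

-- A's output, characterised
theorem headD_append_zero (l : List Int) (h : ∀ x ∈ l, x = 0) : (l ++ [(0 : Int)]).headD 0 = 0 := by
  cases l with
  | nil => rfl
  | cons a t => simpa using h a (by simp)

theorem dropLast_append_getLastD {α : Type} (l : List α) (h : l ≠ []) (d : α) :
    l.dropLast ++ [l.getLastD d] = l := by
  rw [List.getLastD_eq_getLast?, List.getLast?_eq_some_getLast h, Option.getD_some,
    List.dropLast_append_getLast h]

theorem pvPN_chainZ_aux (n : ℕ) : ∀ c : List Int, c.length ≤ n →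
    pvPP (pvChainZ c) = pvP (dzip c) ∧ pvNN (pvChainZ c) = pvN (dzip c) := by
  induction n with
  | zero =>
    intro c hl
    have hc : c = [] := List.eq_nil_of_length_eq_zero (by omega)
    subst hc
    have h1 : pvChainZ [] = [[0]] := by rw [pvChainZ]; simp [dzip]
    constructor
    · rw [h1, show dzip [] = [] from rfl, pvP]
      simp [pvPP]
    · rw [h1, show dzip [] = [] from rfl, pvN]
      simp [pvNN]
  | succ n ih =>
    intro c hl
    have hcz : pvChainZ c = if (dzip c).all (fun x => x == 0) = true
        then [dzip c ++ [0]] else dzip c :: pvChainZ (dzip c) := by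
      rw [pvChainZ]
    rw [hcz]
    by_cases hz : (dzip c).all (fun x => x == 0) = true
    · rw [if_pos hz]
      have hz' : ∀ x ∈ dzip c, x = 0 := by simpa using hz
      constructor
      · simp only [pvPP]
        rw [headD_append_zero _ hz', pvP_zero _ hz']
        ring
      · simp only [pvNN]
        rw [List.getLastD_concat, pvN_zero _ hz']
        ring
    · rw [if_neg hz]
      have hne : dzip c ≠ [] := by intro he; rw [he] at hz; simp at hz
      have hlen : (dzip c).length ≤ n := by
        have := dzip_length c
        have := List.length_pos_iff.mpr hne
        omega
      obtain ⟨ih1, ih2⟩ := ih (dzip c) hlen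
      constructor
      · simp only [pvPP]
        rw [ih1, ← pvP_nonempty _ hne]
      · simp only [pvNN]
        rw [ih2, ← pvN_nonempty _ hne]

theorem pvPP_chainZ (c : List Int) : pvPP (pvChainZ c) = pvP (dzip c) :=
  (pvPN_chainZ_aux c.length c le_rfl).1

theorem pvNN_chainZ (c : List Int) : pvNN (pvChainZ c) = pvN (dzip c) :=
  (pvPN_chainZ_aux c.length c le_rfl).2

theorem predict_values_eq (s : List Int) (h : s ≠ []) :
    predict_values s = pvP s :: (s ++ [pvN s]) := by
  have hC := pvChain_ne_nil s
  have hZ := pvChainZ_ne_nil s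
  have hmem := pvChainZ_mem_ne_nil s
  have hCl : 0 < (pvChain s).length := List.length_pos_iff.mpr hC
  have hZl : 0 < (pvChainZ s).length := List.length_pos_iff.mpr hZ
  simp only [predict_values]
  rw [pvLoopA_eq, show ([s] ++ pvChain s) = s :: pvChain s from rfl]
  have hm : ((s :: pvChain s).length : Int) - 1 = (((pvChain s).length : ℕ) : Int) := by simp
  rw [hm, PySem.List.pyGetD_natCast]
  have e1 : (s :: pvChain s).getD (pvChain s).length [] = (pvChain s).getLastD [] := by
    rw [show (pvChain s).length = ((pvChain s).length - 1) + 1 by omega, List.getD_cons_succ,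
      getD_last _ hC]
  rw [e1]
  have e2 : (s :: pvChain s).set ((s :: pvChain s).length - 1) ((pvChain s).getLastD [] ++ [0])
      = s :: pvChainZ s := by
    rw [show (s :: pvChain s).length - 1 = ((pvChain s).length - 1) + 1 by
        simp only [List.length_cons]; omega,
      List.set_cons_succ, set_last _ hC, pvChainZ_eq]
  rw [e2]
  have hZC : (pvChainZ s).length = (pvChain s).length := by
    rw [← pvChainZ_eq]
    simp only [List.length_append, List.length_dropLast, List.length_cons, List.length_nil]
    omega
  have e3 : (((s :: pvChain s).length : Int)) - 2
      = ((s :: (pvChainZ s).dropLast).length : Int) - 1 := by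
    simp only [List.length_cons, List.length_dropLast]
    push_cast
    omega
  rw [e3]
  have e4 : s :: pvChainZ s
      = (s :: (pvChainZ s).dropLast) ++ pvExtAll [(pvChainZ s).getLastD []] := by
    show s :: pvChainZ s = (s :: (pvChainZ s).dropLast) ++ [(pvChainZ s).getLastD []]
    rw [List.cons_append, dropLast_append_getLastD _ hZ]
  rw [e4, pvDownfold _ _ (List.cons_ne_nil _ _),
    show ((s :: (pvChainZ s).dropLast) ++ [(pvChainZ s).getLastD []]) = s :: pvChainZ s by
      rw [List.cons_append, dropLast_append_getLastD _ hZ]]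
  rw [PySem.List.pyGetD_ofNat', getD_zero, pvExtAll_cons s _ hZ]
  simp only [List.headD_cons]
  obtain ⟨hU1, hU2⟩ := pvExtAll_head (pvChainZ s) hZ hmem
  simp only [pvExt1]
  rw [hU1, hU2, pvPP_chainZ, pvNN_chainZ, headD_append_ne_nil s _ h,
    pvP_nonempty s h, pvN_nonempty s h,
    show -(pvP (dzip s)) + s.headD 0 = s.headD 0 - pvP (dzip s) by ring,
    show pvN (dzip s) + s.getLastD 0 = s.getLastD 0 + pvN (dzip s) by ring]

-- B's output, characterised
def coefSum (s : List Int) : Int :=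
  ∑ j ∈ Finset.range s.length, (-1 : Int) ^ j * (s.length.choose (j + 1) : Int) * s.getD j 0

theorem foldB_aux (s : List Int) (k : ℕ) (hk : k ≤ s.length) :
    (PySem.List.pyRange 0 (k : Int)).foldl
      (fun (st : Int × Int × Int) j =>
        (st.1 + (if PySem.Int.mod j 2 == 0 then st.2.2 else -st.2.2) * PySem.List.pyGetD s j 0,
         st.2.1 + (if PySem.Int.mod j 2 == 0 then st.2.2 else -st.2.2)
            * PySem.List.pyGetD s ((s.length : Int) - 1 - j) 0,
         PySem.Int.floordiv (st.2.2 * ((s.length : Int) - j - 1)) (j + 2)))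
      (0, 0, (s.length : Int))
    = (∑ j ∈ Finset.range k, (-1 : Int) ^ j * (s.length.choose (j + 1) : Int) * s.getD j 0,
       ∑ j ∈ Finset.range k, (-1 : Int) ^ j * (s.length.choose (j + 1) : Int) * s.getD (s.length - 1 - j) 0,
       (s.length.choose (k + 1) : Int)) := by
  induction k with
  | zero =>
    rw [show ((0 : ℕ) : Int) = 0 from rfl, PySem.List.pyRange_one_eq_nil le_rfl]
    simp [Nat.choose_one_right]
  | succ k ih =>
    rw [show ((k + 1 : ℕ) : Int) = (k : Int) + 1 by push_cast; ring,
      PySem.List.pyRange_one_succ_right (by omega), List.foldl_append, ih (by omega)]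
    simp only [List.foldl_cons, List.foldl_nil]
    have hkn : k < s.length := by omega
    have hsg : (if PySem.Int.mod (k : Int) 2 == 0
          then ((s.length.choose (k + 1) : ℕ) : Int) else -((s.length.choose (k + 1) : ℕ) : Int))
        = (-1 : Int) ^ k * (s.length.choose (k + 1) : Int) := by
      have hmod : PySem.Int.mod (k : Int) 2 = ((k % 2 : ℕ) : Int) := by
        exact_mod_cast PySem.Int.mod_natCast k 2
      rcases Nat.even_or_odd k with he | ho
      · have h2 : k % 2 = 0 := Nat.even_iff.mp he
        rw [hmod, h2]
        simp [he.neg_one_pow]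
      · have h2 : k % 2 = 1 := Nat.odd_iff.mp ho
        rw [hmod, h2]
        simp [ho.neg_one_pow]
    simp only [Prod.mk.injEq]
    refine ⟨?_, ?_, ?_⟩
    · rw [hsg, PySem.List.pyGetD_natCast, Finset.sum_range_succ]
    · rw [hsg, show ((s.length : Int) - 1 - (k : Int)) = ((s.length - 1 - k : ℕ) : Int) by omega,
        PySem.List.pyGetD_natCast, Finset.sum_range_succ]
    · rw [show ((s.length : Int) - (k : Int) - 1) = ((s.length - (k + 1) : ℕ) : Int) by omega,
        show ((k : Int) + 2) = ((k + 2 : ℕ) : Int) by push_cast; ring,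
        show (((s.length.choose (k + 1) : ℕ) : Int) * ((s.length - (k + 1) : ℕ) : Int))
          = (((s.length.choose (k + 1) * (s.length - (k + 1)) : ℕ)) : Int) by push_cast; ring,
        PySem.Int.floordiv_natCast]
      norm_cast
      rw [← Nat.choose_succ_right_eq]
      exact Nat.mul_div_cancel _ (by omega)

theorem coefSum_reverse (s : List Int) :
    coefSum s.reverse = ∑ j ∈ Finset.range s.length,
      (-1 : Int) ^ j * (s.length.choose (j + 1) : Int) * s.getD (s.length - 1 - j) 0 := by
  unfold coefSum
  rw [List.length_reverse]
  apply Finset.sum_congr rfl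
  intro j hj
  have hj' : j < s.length := Finset.mem_range.mp hj
  congr 1
  rw [List.getD_eq_getElem _ _ (by simpa using hj'), List.getD_eq_getElem _ _ (by omega),
    List.getElem_reverse]

theorem predict_values_alt_eq (s : List Int) :
    predict_values_alt s = coefSum s :: (s ++ [coefSum s.reverse]) := by
  simp only [predict_values_alt]
  rw [foldB_aux s s.length le_rfl, coefSum_reverse]
  simp [coefSum]

theorem dzip_getD (s : List Int) (j : ℕ) (hj : j < s.length - 1) :
    (dzip s).getD j 0 = s.getD (j + 1) 0 - s.getD j 0 := by
  have hl := dzip_length s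
  rw [List.getD_eq_getElem _ _ (by omega), List.getD_eq_getElem _ _ (by omega),
    List.getD_eq_getElem _ _ (by omega), dzip_getElem]

theorem coefSum_dzip (s : List Int) (h : s ≠ []) :
    coefSum (dzip s) = s.getD 0 0 - coefSum s := by
  obtain ⟨a, t, rfl⟩ : ∃ a t, s = a :: t := by
    cases s with
    | nil => exact absurd rfl h
    | cons a t => exact ⟨a, t, rfl⟩
  have hlen : (a :: t).length = t.length + 1 := by simp
  have hdl : (dzip (a :: t)).length = t.length := by rw [dzip_length]; simp
  unfold coefSum
  simp only [hdl, hlen]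
  have hterm : ∀ j ∈ Finset.range t.length,
      (-1 : Int) ^ j * (t.length.choose (j + 1) : Int) * (dzip (a :: t)).getD j 0
      = (-1 : Int) ^ j * (t.length.choose (j + 1) : Int) * (a :: t).getD (j + 1) 0
        - (-1 : Int) ^ j * (t.length.choose (j + 1) : Int) * (a :: t).getD j 0 := by
    intro j hj
    have hj' : j < t.length := Finset.mem_range.mp hj
    rw [dzip_getD _ j (by simp only [List.length_cons]; omega)]
    ring
  rw [Finset.sum_congr rfl hterm, Finset.sum_sub_distrib]
  have H1 : ∑ j ∈ Finset.range t.length,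
      (-1 : Int) ^ j * (t.length.choose (j + 1) : Int) * (a :: t).getD (j + 1) 0
      = (a :: t).getD 0 0 - ∑ j ∈ Finset.range (t.length + 1),
          (-1 : Int) ^ j * (t.length.choose j : Int) * (a :: t).getD j 0 := by
    have hs := Finset.sum_range_succ'
      (fun j => (-1 : Int) ^ j * (t.length.choose j : Int) * (a :: t).getD j 0) t.length
    have he : ∀ j ∈ Finset.range t.length,
        (-1 : Int) ^ j * (t.length.choose (j + 1) : Int) * (a :: t).getD (j + 1) 0
        = -((-1 : Int) ^ (j + 1) * (t.length.choose (j + 1) : Int) * (a :: t).getD (j + 1) 0) := by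
      intro j hj; ring
    rw [Finset.sum_congr rfl he, Finset.sum_neg_distrib]
    simp only [pow_zero, Nat.choose_zero_right, Nat.cast_one, one_mul] at hs
    linarith [hs]
  have H2 : ∑ j ∈ Finset.range t.length,
      (-1 : Int) ^ j * (t.length.choose (j + 1) : Int) * (a :: t).getD j 0
      = ∑ j ∈ Finset.range (t.length + 1),
          (-1 : Int) ^ j * (t.length.choose (j + 1) : Int) * (a :: t).getD j 0 := by
    rw [Finset.sum_range_succ, Nat.choose_succ_self]
    simp
  rw [H1, H2]
  have H3 : ∑ j ∈ Finset.range (t.length + 1),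
      (-1 : Int) ^ j * ((t.length + 1).choose (j + 1) : Int) * (a :: t).getD j 0
      = ∑ j ∈ Finset.range (t.length + 1),
          ((-1 : Int) ^ j * (t.length.choose j : Int) * (a :: t).getD j 0
           + (-1 : Int) ^ j * (t.length.choose (j + 1) : Int) * (a :: t).getD j 0) := by
    apply Finset.sum_congr rfl
    intro j hj
    rw [Nat.choose_succ_succ]
    push_cast
    ring
  rw [H3, Finset.sum_add_distrib]
  ring

theorem pvP_eq_coefSum_aux (n : ℕ) : ∀ s : List Int, s.length ≤ n → pvP s = coefSum s := by
  induction n with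
  | zero =>
    intro s hl
    have : s = [] := List.eq_nil_of_length_eq_zero (by omega)
    subst this
    rw [pvP]
    simp [coefSum]
  | succ n ih =>
    intro s hl
    cases s with
    | nil => rw [pvP]; simp [coefSum]
    | cons a t =>
      have hne : (a :: t) ≠ [] := List.cons_ne_nil _ _
      rw [pvP, ih (dzip (a :: t))
          (by have := dzip_length (a :: t); simp only [List.length_cons] at this hl; omega),
        coefSum_dzip _ hne]
      simp only [List.getD_cons_zero]
      ring

theorem pvP_eq_coefSum (s : List Int) : pvP s = coefSum s :=
  pvP_eq_coefSum_aux s.length s le_rfl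

theorem dzip_map_neg (s : List Int) :
    dzip (s.map (fun x => -x)) = (dzip s).map (fun x => -x) := by
  apply List.ext_getElem
  · simp [dzip_length]
  · intro i h1 h2
    have hi : i < s.length - 1 := by
      have := dzip_length s; simp [dzip_length] at h1; omega
    rw [List.getElem_map, dzip_getElem, dzip_getElem _ _ (by simpa [dzip_length] using hi)]
    simp only [List.getElem_map]
    ring

theorem ext_getD (l l' : List Int) (hlen : l.length = l'.length)
    (h : ∀ j < l.length, l.getD j 0 = l'.getD j 0) : l = l' := by
  apply List.ext_getElem hlen
  intro i h1 h2
  have := h i h1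
  rwa [List.getD_eq_getElem _ _ h1, List.getD_eq_getElem _ _ h2] at this

theorem getD_reverse (l : List Int) (j : ℕ) (hj : j < l.length) :
    l.reverse.getD j 0 = l.getD (l.length - 1 - j) 0 := by
  rw [List.getD_eq_getElem _ _ (by simpa using hj), List.getD_eq_getElem _ _ (by omega),
    List.getElem_reverse]

theorem getD_map_neg (l : List Int) (j : ℕ) :
    (l.map (fun x => -x)).getD j 0 = -(l.getD j 0) := by
  by_cases hj : j < l.length
  · rw [List.getD_eq_getElem _ _ (by simpa using hj), List.getD_eq_getElem _ _ hj,
      List.getElem_map]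
  · rw [List.getD_eq_default _ _ (by simp; omega), List.getD_eq_default _ _ (by omega)]
    ring

theorem dzip_reverse (s : List Int) :
    dzip s.reverse = ((dzip s).map (fun x => -x)).reverse := by
  have hL := dzip_length s
  apply ext_getD
  · simp [dzip_length]
  · intro j hj
    have hLr : (dzip s.reverse).length = s.length - 1 := by
      rw [dzip_length, List.length_reverse]
    have hj' : j < s.length - 1 := by omega
    rw [dzip_getD s.reverse j (by simp only [List.length_reverse]; omega),
      getD_reverse s (j + 1) (by omega), getD_reverse s j (by omega),
      getD_reverse ((dzip s).map (fun x => -x)) j (by simp only [List.length_map]; omega)]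
    simp only [List.length_map]
    rw [getD_map_neg, dzip_getD s _ (by omega), hL,
      show s.length - 1 - (j + 1) = s.length - 1 - 1 - j by omega,
      show s.length - 1 - 1 - j + 1 = s.length - 1 - j by omega]
    ring

theorem headD_reverse (l : List Int) (d : Int) : l.reverse.headD d = l.getLastD d := by
  cases hl : l.reverse with
  | nil =>
    have : l = [] := by simpa using congrArg List.reverse hl
    subst this; rfl
  | cons a t =>
    rw [List.headD_cons]
    have h1 : l.reverse.head? = some a := by rw [hl]; rfl
    rw [List.head?_reverse] at h1
    rw [List.getLastD_eq_getLast?, h1, Option.getD_some]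

theorem pvP_neg_aux (n : ℕ) : ∀ s : List Int, s.length ≤ n →
    pvP (s.map (fun x => -x)) = -pvP s := by
  induction n with
  | zero =>
    intro s hl
    have : s = [] := List.eq_nil_of_length_eq_zero (by omega)
    subst this
    rw [show ([] : List Int).map (fun x => -x) = [] from rfl, pvP]
    norm_num
  | succ n ih =>
    intro s hl
    cases s with
    | nil => rw [show ([] : List Int).map (fun x => -x) = [] from rfl, pvP]; norm_num
    | cons a t =>
      rw [show ((a :: t).map (fun x => -x)) = -a :: t.map (fun x => -x) from rfl, pvP,
        show (-a :: t.map (fun x => -x)) = (a :: t).map (fun x => -x) from rfl,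
        dzip_map_neg, ih (dzip (a :: t))
          (by have := dzip_length (a :: t); simp only [List.length_cons] at this hl; omega),
        pvP]
      ring

theorem pvP_neg (s : List Int) : pvP (s.map (fun x => -x)) = -pvP s :=
  pvP_neg_aux s.length s le_rfl

theorem pvN_eq_pvP_rev_aux (n : ℕ) : ∀ s : List Int, s.length ≤ n →
    pvN s = pvP s.reverse := by
  induction n with
  | zero =>
    intro s hl
    have : s = [] := List.eq_nil_of_length_eq_zero (by omega)
    subst this
    rw [show ([] : List Int).reverse = [] from rfl, pvP, pvN]
  | succ n ih =>
    intro s hl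
    cases s with
    | nil => rw [show ([] : List Int).reverse = [] from rfl, pvP, pvN]
    | cons a t =>
      have hne : (a :: t) ≠ [] := List.cons_ne_nil _ _
      have hrne : (a :: t).reverse ≠ [] := by simp
      have hlen : (dzip (a :: t)).length ≤ n := by
        have := dzip_length (a :: t); simp only [List.length_cons] at this hl; omega
      rw [pvN_nonempty _ hne, pvP_nonempty _ hrne, headD_reverse, dzip_reverse,
        ← List.map_reverse, pvP_neg, ih (dzip (a :: t)) hlen]
      ring

theorem pvN_eq_coefSum_rev (s : List Int) : pvN s = coefSum s.reverse := by
  rw [pvN_eq_pvP_rev_aux s.length s le_rfl, pvP_eq_coefSum]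

-- ===== VERDICT (by name: the statement is the Claim_ definition above) =====
theorem predict_values_spec : Claim_equal_predict_values := by
  intro s _ hpre
  unfold Spec_predict_values
  rw [predict_values_eq s hpre, predict_values_alt_eq s, pvP_eq_coefSum, pvN_eq_coefSum_rev]
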